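-- pv_equiv track=rewrite | github.com/activeloopai/deeplake | hub/util/access_method.py | parse_access_method
-- ===== SOURCE A (Python) =====
-- def parse_access_method(access_method: str):
--     num_workers = None
--     scheduler = None
--     if access_method.startswith("download"):
--         split = access_method.split(":")
--         if len(split) == 1:
--             split.extend(("threaded", "0"))
--         elif len(split) == 2:
--             split.append("threaded" if split[1].isnumeric() else "0")
--         elif len(split) >= 3:
--             num_integers = sum(1 for i in split if i.isnumeric())
--             if num_integers != 1 or len(split) > 3:
--                 raise ValueError(
--                     "Invalid access_method format. Expected format is one of the following: {download, download:scheduler, download:num_workers, download:scheduler:num_workers, download:num_workers:scheduler}"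
--                 )
--
--         access_method = "download"
--         num_worker_index = 1 if split[1].isnumeric() else 2
--         scheduler_index = 3 - num_worker_index
--         num_workers = int(split[num_worker_index])
--         scheduler = split[scheduler_index]
--     return access_method, num_workers, scheduler
-- ===== SOURCE B (Python) =====
-- def parse_access_method(access_method: str):
--     if not access_method.startswith("download"):
--         return access_method, None, None
--     parts = access_method.split(":")[1:]
--     numerics = [p for p in parts if p.isnumeric()]
--     others = [p for p in parts if not p.isnumeric()]
--     if len(parts) > 2 or (len(parts) == 2 and len(numerics) != 1):
--         raise ValueError(
--             "Invalid access_method format. Expected format is one of the following: {download, download:scheduler, download:num_workers, download:scheduler:num_workers, download:num_workers:scheduler}"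
--         )
--     num_workers = int(numerics[0]) if numerics else 0
--     scheduler = others[0] if others else "threaded"
--     return "download", num_workers, scheduler
-- ===== Notes on version B (the rewrite author's own statement) =====
-- stated objective: simpler
-- what changed: Instead of mutating the split list to length 3 and computing worker/scheduler indices arithmetically, B partitions the trailing parts into numeric and non-numeric groups and reads each result directly (with defaults 0 / 'threaded').
import Mathlib
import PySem

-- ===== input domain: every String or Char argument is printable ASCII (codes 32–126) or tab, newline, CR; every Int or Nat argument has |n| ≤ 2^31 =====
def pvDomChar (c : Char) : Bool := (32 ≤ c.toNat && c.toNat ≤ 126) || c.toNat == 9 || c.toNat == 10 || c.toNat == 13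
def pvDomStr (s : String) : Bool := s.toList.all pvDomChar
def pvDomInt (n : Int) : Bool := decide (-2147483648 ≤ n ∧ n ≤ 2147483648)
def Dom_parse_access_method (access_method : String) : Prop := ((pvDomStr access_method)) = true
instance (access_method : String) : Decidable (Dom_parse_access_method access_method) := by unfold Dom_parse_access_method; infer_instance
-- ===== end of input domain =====

-- B replaces A's list mutation and index arithmetic by partitioning the trailing parts
-- into numeric / non-numeric groups (objective: simpler).
-- Python's str.isnumeric() is ported as PySem.Str.strIsdigit: exact on the printable-ASCII domain Dom.

-- ===== PORT A =====
def parse_access_method (access_method : String) : String × Option Int × Option String :=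
  if PySem.Str.startswith access_method "download" then
    let split0 := (PySem.Str.split? access_method ":").getD []
    -- the len==1 / len==2 mutations of `split`; the len ≥ 3 invalid case raises ValueError
    -- in Python and is excluded by Pre_ (the value computed below is unclaimed there)
    let split :=
      if split0.length = 1 then split0 ++ ["threaded", "0"]
      else if split0.length = 2 then
        split0 ++ [if PySem.Str.strIsdigit ((PySem.List.pyGet? split0 1).getD "") then "threaded" else "0"]
      else split0
    let num_worker_index : Int := if PySem.Str.strIsdigit ((PySem.List.pyGet? split 1).getD "") then 1 else 2
    let scheduler_index : Int := 3 - num_worker_index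
    let num_workers : Int := (PySem.Int.ofStr? ((PySem.List.pyGet? split num_worker_index).getD "")).getD 0
    let scheduler := (PySem.List.pyGet? split scheduler_index).getD ""
    ("download", some num_workers, some scheduler)
  else
    (access_method, none, none)

-- ===== PORT B =====
def parse_access_method_alt (access_method : String) : String × Option Int × Option String :=
  if PySem.Str.startswith access_method "download" then
    let parts := ((PySem.Str.split? access_method ":").getD []).drop 1   -- split(":")[1:]
    let numerics := parts.filter (fun p => PySem.Str.strIsdigit p)
    let others := parts.filter (fun p => ! PySem.Str.strIsdigit p)
    -- the ValueError branch (len parts > 2, or len parts = 2 with ≠ 1 numeric) is excluded by Pre_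
    let num_workers : Int := match numerics with
      | n :: _ => (PySem.Int.ofStr? n).getD 0
      | [] => 0
    let scheduler := match others with | o :: _ => o | [] => "threaded"
    ("download", some num_workers, some scheduler)
  else
    (access_method, none, none)

-- ===== PRECONDITION & SPEC =====
-- Pre_ excludes exactly the inputs on which A raises ValueError: a "download…" string whose
-- split has ≥ 4 fields, or exactly 3 fields without exactly one numeric trailing field
-- (the leading field starts with 'd', so it is never numeric). `split ≠ []` always holds.
def Pre_parse_access_method (access_method : String) : Prop :=
  PySem.Str.startswith access_method "download" = true →
    (let split := (PySem.Str.split? access_method ":").getD []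
     split ≠ [] ∧ split.length ≤ 3 ∧
       (split.length = 3 → (split.drop 1).countP (fun p => PySem.Str.strIsdigit p) = 1))
instance (access_method : String) : Decidable (Pre_parse_access_method access_method) := by
  unfold Pre_parse_access_method; infer_instance
def pvWitness_parse_access_method : String := "download:5:proc"
def Spec_parse_access_method (access_method : String) (out : String × Option Int × Option String) : Prop := out = parse_access_method_alt access_method
instance (access_method : String) (out : String × Option Int × Option String) : Decidable (Spec_parse_access_method access_method out) := by unfold Spec_parse_access_method; infer_instance

-- ===== CLAIM (what is proved, stated in full; the proofs are below) =====
def Claim_equal_parse_access_method : Prop := ∀ (access_method : String), Dom_parse_access_method access_method → Pre_parse_access_method access_method → Spec_parse_access_method access_method (parse_access_method access_method)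

-- ===== LEMMAS AND PROOFS =====
-- (none needed beyond the verdict proof)

-- ===== VERDICT =====
theorem parse_access_method_spec : Claim_equal_parse_access_method := by
  intro s _hdom hpre
  unfold Spec_parse_access_method parse_access_method parse_access_method_alt
  by_cases hsw : PySem.Str.startswith s "download" = true
  · simp only [PySem.Str.startswith]
    have hpre' := hpre hsw
    generalize hts : (PySem.Str.split? s ":").getD [] = ts at hpre' ⊢
    obtain ⟨hne, hlen, hcnt⟩ := hpre'
    have hth : PySem.Chars.strIsdigit ['t','h','r','e','a','d','e','d'] = false := by decide
    have h0 : PySem.Int.ofStr? "0" = some 0 := by decide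
    match ts, hne with
    | [a], _ => simp [hth, h0]
    | [a, b], _ =>
        by_cases hb : PySem.Chars.strIsdigit b.toList = true <;>
          simp [hb, h0]
    | [a, b, c], _ =>
        simp only [List.length_cons, List.length_nil] at hcnt
        have hcnt' := hcnt trivial
        simp only [List.drop, List.countP_cons, List.countP_nil,
          PySem.Str.strIsdigit_eq] at hcnt'
        by_cases hb : PySem.Chars.strIsdigit b.toList = true <;>
          by_cases hc : PySem.Chars.strIsdigit c.toList = true <;>
          simp [hb, hc] at hcnt' ⊢
    | a :: b :: c :: d :: rest, _ =>
        simp at hlen; omega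
  · simp only [Bool.not_eq_true] at hsw
    simp [PySem.Str.startswith] at hsw
    simp [hsw]
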